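-- pv_equiv track=rewrite | github.com/xneg/AdventOfCode2022 | src/day_19.py | get_all_outcomes
-- ===== SOURCE A (Python) =====
-- import copy
-- from itertools import groupby
--
-- def get_all_outcomes(initial_minerals, blueprint):
--     combo = []
--     def get_all_possible_purchases(minerals, blueprint, acc):
--         for robot, price in blueprint.items():
--             purchasable = True
--             current_minerals = copy.deepcopy(minerals)
--             for (mineral, cost) in price.items():
--                 if current_minerals[mineral] < cost:
--                     purchasable = False
--                     break
--                 else:
--                     current_minerals[mineral] = current_minerals[mineral] - cost
--             if purchasable:
--                 current_combo = [(key, len(list(group))) for key, group in groupby(sorted(acc + [robot]))]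
--                 combo.append((current_combo, current_minerals))
--                 get_all_possible_purchases(current_minerals, blueprint, acc + [robot])
--
--     get_all_possible_purchases(minerals = initial_minerals, blueprint=blueprint, acc=[])
--     return combo + [([], initial_minerals)]
-- ===== SOURCE B (Python) =====
-- from itertools import groupby
--
--
-- def try_buy(minerals, price):
--     current = dict(minerals)
--     for mineral, cost in price.items():
--         if current[mineral] < cost:
--             return None
--         current[mineral] = current[mineral] - cost
--     return current
--
--
-- def get_all_outcomes(initial_minerals, blueprint):
--     combo = []
--     # explicit DFS worklist; each state = (entry-to-emit-or-None, minerals, acc)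
--     stack = [(None, initial_minerals, [])]
--     while stack:
--         entry, minerals, acc = stack.pop()
--         if entry is not None:
--             combo.append((entry, minerals))
--         children = []
--         for robot, price in blueprint.items():
--             new_minerals = try_buy(minerals, price)
--             if new_minerals is not None:
--                 counts = [(k, len(list(g))) for k, g in groupby(sorted(acc + [robot]))]
--                 children.append((counts, new_minerals, acc + [robot]))
--         stack.extend(reversed(children))
--     return combo + [([], initial_minerals)]
-- ===== Notes on version B (the rewrite author's own statement) =====
-- stated objective: alternative
-- what changed: A's nested recursive closure mutating an outer accumulator is replaced by an explicit LIFO worklist of (pending-entry, minerals, acc) states popped in a while loop, with affordability factored into a copy-and-subtract try_buy helper returning the new minerals or None; the DFS pre-order is preserved by emitting an entry when its state is popped.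
import Mathlib
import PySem

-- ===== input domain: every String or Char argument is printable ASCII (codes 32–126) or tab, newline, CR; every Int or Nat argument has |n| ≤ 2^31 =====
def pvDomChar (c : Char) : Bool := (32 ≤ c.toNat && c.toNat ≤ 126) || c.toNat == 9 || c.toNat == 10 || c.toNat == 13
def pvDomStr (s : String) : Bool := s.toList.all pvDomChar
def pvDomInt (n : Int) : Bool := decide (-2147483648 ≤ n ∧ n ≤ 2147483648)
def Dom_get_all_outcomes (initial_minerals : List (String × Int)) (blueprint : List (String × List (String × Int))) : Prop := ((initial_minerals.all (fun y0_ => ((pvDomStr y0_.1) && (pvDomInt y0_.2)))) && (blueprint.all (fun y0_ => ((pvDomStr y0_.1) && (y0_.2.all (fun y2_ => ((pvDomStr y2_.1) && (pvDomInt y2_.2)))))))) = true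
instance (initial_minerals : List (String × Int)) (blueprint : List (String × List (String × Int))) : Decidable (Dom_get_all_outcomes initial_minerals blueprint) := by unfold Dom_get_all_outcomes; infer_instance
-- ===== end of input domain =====

-- B replaces A's recursive closure by an explicit LIFO worklist of (entry, minerals, acc) states
-- (same DFS pre-order, same values); objective: alternative decomposition, not speed.

-- Shared helpers (identical sub-computations of both Pythons):
-- [(k, len(list(g))) for k, g in groupby(sorted(l))] — run-length encoding of the sorted list.
def pvRLE : List String → List (String × Int)
  | [] => []
  | x :: rest =>
    (x, ((rest.takeWhile (fun y => y == x)).length + 1 : Int)) :: pvRLE (rest.dropWhile (fun y => y == x))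
termination_by l => l.length
decreasing_by
  have := List.length_dropWhile_le (p := fun y => y == x) (l := rest)
  simp; omega

def pvCounts (l : List String) : List (String × Int) :=
  pvRLE (PySem.List.sorted l (fun x => x) false)

-- Nat measure of a mineral dict: sum of the (clamped-at-0) values.  Each Python purchase of a
-- robot admitted by Pre_ strictly decreases it (its total cost is ≥ 1 and every value stays
-- bounded); 'pvMeas md + 1' is therefore a fuel bound the guarded recursions below never exhaust
-- on admitted inputs (guards only totalize the ports).
def pvMeas (d : PySem.Dict String Int) : Nat := (d.values.map Int.toNat).sum

abbrev pvEntry := (List (String × Int)) × (List (String × Int))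

-- ===== PORT A =====
-- inner 'for (mineral, cost) in price.items()' loop with the purchasable flag and break
def pvBuyA (cm : PySem.Dict String Int) : List (String × Int) → Bool × PySem.Dict String Int
  | [] => (true, cm)
  | (m, c) :: rest =>
    match cm.get? m with
    | none => (false, cm)   -- Python raises KeyError here; such inputs are outside Pre_
    | some v => if v < c then (false, cm) else pvBuyA (cm.insert m (v - c)) rest

-- get_all_possible_purchases: returns the entries it appends to combo, in order;
-- 'fuel' merely totalizes the recursion (never exhausted under Pre_, see pvMeas).
def pvHelperA (bpAll : List (String × List (String × Int))) :
    Nat → List (String × List (String × Int)) → PySem.Dict String Int → List String → List pvEntry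
  | _, [], _, _ => []
  | 0, _ :: _, _, _ => []
  | f + 1, (robot, price) :: rest, minerals, acc =>
    let r := pvBuyA minerals price
    if r.1 then
      (pvCounts (acc ++ [robot]), r.2.items) ::
        (pvHelperA bpAll f bpAll r.2 (acc ++ [robot]) ++ pvHelperA bpAll (f + 1) rest minerals acc)
    else pvHelperA bpAll (f + 1) rest minerals acc

-- the blueprint dict-of-dicts, as its item lists
def pvBp (blueprint : List (String × List (String × Int))) : List (String × List (String × Int)) :=
  (PySem.Dict.ofList blueprint).items.map (fun rp => (rp.1, (PySem.Dict.ofList rp.2).items))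

def get_all_outcomes (initial_minerals : List (String × Int)) (blueprint : List (String × List (String × Int))) : List ((List (String × Int)) × (List (String × Int))) :=
  pvHelperA (pvBp blueprint) (pvMeas (PySem.Dict.ofList initial_minerals) + 1) (pvBp blueprint)
      (PySem.Dict.ofList initial_minerals) []
    ++ [(([] : List (String × Int)), (PySem.Dict.ofList initial_minerals).items)]

-- ===== PORT B =====
-- try_buy: copy the dict, subtract costs, None on shortfall (or missing key = KeyError, outside Pre_)
def pvTryBuy (cur : PySem.Dict String Int) : List (String × Int) → Option (PySem.Dict String Int)
  | [] => some cur
  | (m, c) :: rest =>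
    match cur.get? m with
    | none => none
    | some v => if v < c then none else pvTryBuy (cur.insert m (v - c)) rest

-- a worklist state: (entry to emit when popped, minerals, acc, fuel); fuel only totalizes the loop
abbrev pvState := Option (List (String × Int)) × PySem.Dict String Int × List String × Nat

-- the 'for robot, price in blueprint.items(): … children.append(…)' loop
def pvExpand (bp : List (String × List (String × Int))) (m : PySem.Dict String Int)
    (acc : List String) (f : Nat) : List pvState :=
  match bp with
  | [] => []
  | (robot, price) :: rest =>
    match pvTryBuy m price with
    | some nm => (some (pvCounts (acc ++ [robot])), nm, acc ++ [robot], f) :: pvExpand rest m acc f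
    | none => pvExpand rest m acc f

def pvStackPot (C : Nat) (stack : List pvState) : Nat := (stack.map (fun st => C ^ st.2.2.2)).sum

-- termination lemma for pvLoopB (cited in its decreasing_by)
theorem pvExpand_pot_le (C : Nat) (bp : List (String × List (String × Int)))
    (m : PySem.Dict String Int) (acc : List String) (f : Nat) :
    pvStackPot C (pvExpand bp m acc f) ≤ bp.length * C ^ f := by
  induction bp with
  | nil => simp [pvExpand, pvStackPot]
  | cons hd tl ih =>
    obtain ⟨robot, price⟩ := hd
    simp only [pvExpand]
    cases pvTryBuy m price with
    | none =>
      calc pvStackPot C (pvExpand tl m acc f) ≤ tl.length * C ^ f := ih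
        _ ≤ (tl.length + 1) * C ^ f := Nat.mul_le_mul_right _ (Nat.le_succ _)
        _ = ((robot, price) :: tl).length * C ^ f := by simp [add_mul]
    | some nm =>
      have hstep : pvStackPot C ((some (pvCounts (acc ++ [robot])), nm, acc ++ [robot], f) :: pvExpand tl m acc f)
          = C ^ f + pvStackPot C (pvExpand tl m acc f) := by simp [pvStackPot]
      rw [hstep]
      simp only [List.length_cons, Nat.add_mul, Nat.one_mul]
      omega

-- the purchasable children of a popped state (fuel-guarded; the guard only totalizes the loop)
def pvChildren (bpItems : List (String × List (String × Int))) (st : pvState) : List pvState :=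
  match st.2.2.2 with
  | 0 => []
  | f + 1 => pvExpand bpItems st.2.1 st.2.2.1 f

-- termination lemma for pvLoopB (cited in its decreasing_by)
theorem pvChildren_pot_lt (bpItems : List (String × List (String × Int))) (st : pvState) :
    pvStackPot (bpItems.length + 1) (pvChildren bpItems st) < (bpItems.length + 1) ^ st.2.2.2 := by
  obtain ⟨e, m, acc, f⟩ := st
  cases f with
  | zero => simp [pvChildren, pvStackPot]
  | succ f =>
    have h := pvExpand_pot_le (bpItems.length + 1) bpItems m acc f
    have hp : 0 < (bpItems.length + 1) ^ f := by positivity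
    calc pvStackPot (bpItems.length + 1) (pvChildren bpItems (e, m, acc, f + 1))
        ≤ bpItems.length * (bpItems.length + 1) ^ f := h
      _ < (bpItems.length + 1) * (bpItems.length + 1) ^ f := by
          exact Nat.mul_lt_mul_of_lt_of_le (Nat.lt_succ_self _) (le_refl _) hp
      _ = (bpItems.length + 1) ^ (f + 1) := by ring

-- the 'while stack:' loop; python pops from the end and extends with reversed(children),
-- so with the TOP of the stack at the HEAD of the Lean list this is exactly 'children ++ rest'.
def pvLoopB (bpItems : List (String × List (String × Int))) (stack : List pvState)
    (combo : List pvEntry) : List pvEntry :=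
  match stack with
  | [] => combo
  | st :: rest =>
    let combo' := match st.1 with
      | some e => combo ++ [(e, st.2.1.items)]
      | none => combo
    pvLoopB bpItems (pvChildren bpItems st ++ rest) combo'
termination_by pvStackPot (bpItems.length + 1) stack
decreasing_by
  simp only [pvStackPot, List.map_append, List.sum_append, List.map_cons, List.sum_cons]
  have h := pvChildren_pot_lt bpItems st
  simp only [pvStackPot] at h
  omega

def get_all_outcomes_alt (initial_minerals : List (String × Int)) (blueprint : List (String × List (String × Int))) : List ((List (String × Int)) × (List (String × Int))) :=
  pvLoopB (pvBp blueprint)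
      [(none, PySem.Dict.ofList initial_minerals, [], pvMeas (PySem.Dict.ofList initial_minerals) + 1)] []
    ++ [(([] : List (String × Int)), (PySem.Dict.ofList initial_minerals).items)]

-- ===== PRECONDITION & SPEC =====
-- Pre_ excludes exactly the inputs on which Python A raises a KeyError (a reachable affordability
-- check prices a mineral absent from the minerals dict) or may recurse forever (a robot whose
-- total cost is ≤ 0 can keep the recursion alive, and whether such a robot ever becomes
-- affordable is a reachability question with no closed form, so a few terminating blueprints of
-- that kind are excluded too — see the cite in claim.json).  A robot is admitted if it is
-- genuinely buyable (all priced minerals present, total cost ≥ 1 — individual costs may be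
-- negative) or provably never buyable: either its cost at some reachable check index exceeds the
-- largest value any mineral can ever attain, or (when every cost in the blueprint is nonnegative,
-- so minerals only decrease) it already exceeds the initial stock.
def Pre_get_all_outcomes (initial_minerals : List (String × Int)) (blueprint : List (String × List (String × Int))) : Prop :=
  let md := PySem.Dict.ofList initial_minerals
  let bp := (PySem.Dict.ofList blueprint).items.map (fun rp => (rp.1, (PySem.Dict.ofList rp.2).items))
  let M : Int := ((md.values.map Int.toNat).sum : Nat)
  let containsUpto := fun (price : List (String × Int)) (i : Nat) =>
    (List.range (i + 1)).all (fun j => md.contains ((price.getD j ("", 0)).1))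
  let buyable := fun (price : List (String × Int)) =>
    price.all (fun mc => md.contains mc.1) && decide (1 ≤ (price.map Prod.snd).sum)
  let nonneg := fun (price : List (String × Int)) => price.all (fun mc => decide (0 ≤ mc.2))
  let permEasy := fun (price : List (String × Int)) =>
    (List.range price.length).any (fun i =>
      containsUpto price i && decide (md.getD ((price.getD i ("", 0)).1) 0 < (price.getD i ("", 0)).2))
  let permHard := fun (price : List (String × Int)) =>
    (List.range price.length).any (fun i =>
      containsUpto price i && decide (M < (price.getD i ("", 0)).2))
  ((bp.all (fun rp => (nonneg rp.2 && buyable rp.2) || permEasy rp.2))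
    || (bp.all (fun rp => buyable rp.2 || permHard rp.2))) = true

instance (initial_minerals : List (String × Int)) (blueprint : List (String × List (String × Int))) : Decidable (Pre_get_all_outcomes initial_minerals blueprint) := by
  unfold Pre_get_all_outcomes; infer_instance

def pvWitness_get_all_outcomes : (List (String × Int)) × (List (String × List (String × Int))) :=
  ([("ore", 4), ("clay", 1)], [("r", [("ore", 2)]), ("s", [("ore", 1), ("clay", 1)])])

def Spec_get_all_outcomes (initial_minerals : List (String × Int)) (blueprint : List (String × List (String × Int))) (out : List ((List (String × Int)) × (List (String × Int)))) : Prop := out = get_all_outcomes_alt initial_minerals blueprint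
instance (initial_minerals : List (String × Int)) (blueprint : List (String × List (String × Int))) (out : List ((List (String × Int)) × (List (String × Int)))) : Decidable (Spec_get_all_outcomes initial_minerals blueprint out) := by unfold Spec_get_all_outcomes; infer_instance

-- ===== CLAIM (what is proved, stated in full; the proofs are below) =====
def Claim_equal_get_all_outcomes : Prop := ∀ (initial_minerals : List (String × Int)) (blueprint : List (String × List (String × Int))), Dom_get_all_outcomes initial_minerals blueprint → Pre_get_all_outcomes initial_minerals blueprint → Spec_get_all_outcomes initial_minerals blueprint (get_all_outcomes initial_minerals blueprint)

-- ===== LEMMAS AND PROOFS =====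

-- the two affordability loops compute the same thing
theorem pvTryBuy_eq_buyA (price : List (String × Int)) (cm : PySem.Dict String Int) :
    pvTryBuy cm price = if (pvBuyA cm price).1 then some (pvBuyA cm price).2 else none := by
  induction price generalizing cm with
  | nil => simp [pvTryBuy, pvBuyA]
  | cons hd tl ih =>
    obtain ⟨m, c⟩ := hd
    simp only [pvTryBuy, pvBuyA]
    cases cm.get? m with
    | none => simp
    | some v =>
      by_cases h : v < c
      · simp [h]
      · simp [h, ih]

-- the DFS entry list a popped state contributes: its own entry, then its whole subtree (port A's view)
def pvDfs (bpItems : List (String × List (String × Int))) (st : pvState) : List pvEntry :=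
  (match st.1 with | some e => [(e, st.2.1.items)] | none => []) ++
    pvHelperA bpItems st.2.2.2 bpItems st.2.1 st.2.2.1

theorem pvExpand_dfs (bpAll bp : List (String × List (String × Int)))
    (m : PySem.Dict String Int) (acc : List String) (f : Nat) :
    ((pvExpand bp m acc f).map (pvDfs bpAll)).flatten = pvHelperA bpAll (f + 1) bp m acc := by
  induction bp with
  | nil => simp [pvExpand, pvHelperA]
  | cons hd tl ih =>
    obtain ⟨robot, price⟩ := hd
    simp only [pvExpand, pvHelperA]
    rw [pvTryBuy_eq_buyA]
    by_cases h : (pvBuyA m price).1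
    · simp [h, pvDfs, ih]
    · simp [h, ih]

theorem pvHelperA_fuel_zero (bpAll bp : List (String × List (String × Int)))
    (m : PySem.Dict String Int) (acc : List String) :
    pvHelperA bpAll 0 bp m acc = [] := by
  cases bp <;> simp [pvHelperA]

theorem pvChildren_dfs (bpItems : List (String × List (String × Int))) (st : pvState) :
    (match st.1 with | some e => [(e, st.2.1.items)] | none => ([] : List pvEntry)) ++
      ((pvChildren bpItems st).map (pvDfs bpItems)).flatten = pvDfs bpItems st := by
  obtain ⟨e, m, acc, f⟩ := st
  cases f with
  | zero => simp [pvChildren, pvDfs, pvHelperA_fuel_zero]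
  | succ f => simp [pvChildren, pvDfs, pvExpand_dfs]

theorem pvLoopB_eq_dfs (bpItems : List (String × List (String × Int))) (stack : List pvState)
    (combo : List pvEntry) :
    pvLoopB bpItems stack combo = combo ++ (stack.map (pvDfs bpItems)).flatten := by
  induction stack, combo using pvLoopB.induct bpItems with
  | case1 combo => simp [pvLoopB]
  | case2 combo st rest combo' ih =>
    rw [pvLoopB]
    rw [ih]
    simp only [List.map_append, List.flatten_append, List.map_cons, List.flatten_cons]
    have hc := pvChildren_dfs bpItems st
    cases h1 : st.1 with
    | none =>
      simp only [h1, List.nil_append] at hc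
      simp only [combo', h1, hc]
    | some e =>
      simp only [h1, List.singleton_append] at hc
      simp only [combo', h1, ← hc, List.append_assoc, List.cons_append, List.nil_append]

-- ===== VERDICT (by name: the statement is the Claim_ definition above) =====
theorem get_all_outcomes_spec : Claim_equal_get_all_outcomes := by
  unfold Claim_equal_get_all_outcomes
  intro initial_minerals blueprint _ _
  unfold Spec_get_all_outcomes get_all_outcomes get_all_outcomes_alt
  rw [pvLoopB_eq_dfs]
  simp [pvDfs]
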